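-- pv_equiv track=rewrite | github.com/mihiarc/socialmapper | socialmapper/census/services/census_service.py | _group_geoids_by_state
-- ===== SOURCE A (Python) =====
-- from typing import Any, Dict, List, Optional, Tuple
--
-- def _group_geoids_by_state(geoids: List[str]) -> Dict[str, List[str]]:
--     """Group GEOIDs by state for efficient API calls."""
--     state_groups = {}
--
--     for geoid in geoids:
--         if len(geoid) >= 2:
--             state_fips = geoid[:2]
--             if state_fips not in state_groups:
--                 state_groups[state_fips] = []
--             state_groups[state_fips].append(geoid)
--
--     return state_groups
-- ===== SOURCE B (Python) =====
-- def _group_geoids_by_state(geoids):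
--     """Group GEOIDs by state: two-pass comprehension pipeline instead of incremental bucketing."""
--     kept = [g for g in geoids if len(g) >= 2]
--     order = dict.fromkeys(g[:2] for g in kept)
--     return {p: [g for g in kept if g[:2] == p] for p in order}
-- ===== Notes on version B (the rewrite author's own statement) =====
-- stated objective: alternative
-- what changed: Replaces the single-pass incremental dict bucketing with a two-pass pipeline: filter once, dedup the state prefixes in first-appearance order, then build each group by a filter comprehension over the kept list.
import Mathlib
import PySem

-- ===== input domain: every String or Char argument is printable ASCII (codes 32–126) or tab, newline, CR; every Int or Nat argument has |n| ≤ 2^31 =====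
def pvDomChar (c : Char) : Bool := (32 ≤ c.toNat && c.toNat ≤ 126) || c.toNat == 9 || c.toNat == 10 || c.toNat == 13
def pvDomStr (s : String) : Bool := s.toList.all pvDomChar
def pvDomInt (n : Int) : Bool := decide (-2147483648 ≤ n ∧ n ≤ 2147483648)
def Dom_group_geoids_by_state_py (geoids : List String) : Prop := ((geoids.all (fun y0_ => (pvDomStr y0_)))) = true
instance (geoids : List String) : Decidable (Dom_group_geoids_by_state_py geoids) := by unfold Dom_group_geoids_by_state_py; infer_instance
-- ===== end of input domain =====

-- B replaces A's single-pass dict bucketing with filter → ordered dedup of prefixes → per-prefix filter (alternative decomposition, not claimed faster).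

-- ===== PORT A =====
def group_geoids_by_state_py (geoids : List String) : List (String × List String) :=
  (geoids.foldl
    (fun (d : PySem.Dict String (List String)) geoid =>
      if 2 ≤ PySem.Str.len geoid then
        let state_fips := PySem.Str.slice geoid none (some 2)
        let d := if d.contains state_fips then d else d.insert state_fips []
        d.modify state_fips [] (fun l => l ++ [geoid])
      else d)
    PySem.Dict.empty).items

-- ===== PORT B =====
def group_geoids_by_state_py_alt (geoids : List String) : List (String × List String) :=
  let kept := geoids.filter (fun g => 2 ≤ PySem.Str.len g)
  let order := PySem.List.dedup (kept.map (fun g => PySem.Str.slice g none (some 2)))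
  order.map (fun p => (p, kept.filter (fun g => PySem.Str.slice g none (some 2) == p)))

-- ===== PRECONDITION & SPEC =====
def Spec_group_geoids_by_state_py (geoids : List String) (out : List (String × List String)) : Prop := out = group_geoids_by_state_py_alt geoids
instance (geoids : List String) (out : List (String × List String)) : Decidable (Spec_group_geoids_by_state_py geoids out) := by unfold Spec_group_geoids_by_state_py; infer_instance

-- ===== CLAIM (what is proved, stated in full; the proofs are below) =====
def Claim_equal_group_geoids_by_state_py : Prop := ∀ (geoids : List String), Dom_group_geoids_by_state_py geoids → Spec_group_geoids_by_state_py geoids (group_geoids_by_state_py geoids)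

-- ===== LEMMAS AND PROOFS =====

-- A's "if absent insert []; then append" step is the same dict as a single modify with default [].
theorem pv_step_eq_modify (d : PySem.Dict String (List String)) (p : String) (g : String) :
    (if d.contains p then d else d.insert p []).modify p [] (fun l => l ++ [g])
      = d.modify p [] (fun l => l ++ [g]) := by
  by_cases h : d.contains p = true
  · simp [h]
  · simp [h, PySem.Dict.modify, PySem.Dict.getD_insert_self,
      PySem.Dict.getD_of_not_contains _ _ (by simpa using h),
      PySem.Dict.insert_insert_self]

-- a guarded fold is the fold over the filtered list
theorem pv_foldl_if_eq_filter {α β : Type} (c : α → Prop) [DecidablePred c] (f : β → α → β) :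
    ∀ (l : List α) (b : β),
      l.foldl (fun b a => if c a then f b a else b) b
        = (l.filter (fun a => decide (c a))).foldl f b := by
  intro l
  induction l with
  | nil => intro b; rfl
  | cons x xs ih =>
      intro b
      by_cases h : c x <;> simp [h, ih]

-- ===== VERDICT (by name: the statement is the Claim_ definition above) =====
-- A's per-element step, after pv_step_eq_modify, as a function
theorem pv_stepfun_eq :
    (fun (d : PySem.Dict String (List String)) geoid =>
      if 2 ≤ PySem.Str.len geoid then
        let state_fips := PySem.Str.slice geoid none (some 2)
        let d := if d.contains state_fips then d else d.insert state_fips []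
        d.modify state_fips [] (fun l => l ++ [geoid])
      else d)
    = (fun (d : PySem.Dict String (List String)) g =>
        if 2 ≤ PySem.Str.len g then
          d.modify (PySem.Str.slice g none (some 2)) [] (fun l => l ++ [g])
        else d) := by
  funext d g
  by_cases h : 2 ≤ PySem.Str.len g <;> simp [pv_step_eq_modify]

theorem pv_pairs (l : List String) (d : PySem.Dict String (List String)) :
    l.foldl (fun d g => d.modify (PySem.Str.slice g none (some 2)) [] (fun l => l ++ [g])) d
      = (l.map (fun g => (PySem.Str.slice g none (some 2), g))).foldl
          (fun d p => d.modify p.1 [] (fun l => l ++ [p.2])) d := by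
  simp [List.foldl_map]

theorem group_geoids_by_state_py_spec : Claim_equal_group_geoids_by_state_py := by
  intro geoids _
  unfold Spec_group_geoids_by_state_py group_geoids_by_state_py group_geoids_by_state_py_alt
  rw [pv_stepfun_eq, pv_foldl_if_eq_filter (fun g => 2 ≤ PySem.Str.len g)]
  set kept := geoids.filter (fun g => decide (2 ≤ PySem.Str.len g)) with hkept
  rw [pv_pairs]
  set pairs := kept.map (fun g => (PySem.Str.slice g none (some 2), g)) with hpairs
  set d := pairs.foldl (fun d p => d.modify p.1 [] (fun l => l ++ [p.2])) PySem.Dict.empty with hd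
  have hnd : d.keys.Nodup := by
    rw [hd]
    exact PySem.Dict.nodup_keys_foldl_modify_key pairs Prod.fst [] (fun _ p l => l ++ [p.2])
      PySem.Dict.empty (by simp)
  rw [PySem.Dict.items_eq_map_keys d hnd []]
  have hkeys : d.keys = PySem.List.dedup (kept.map (fun g => PySem.Str.slice g none (some 2))) := by
    rw [hd, PySem.Dict.keys_foldl_modify_key]
    simp [hpairs, List.map_map, Function.comp_def, PySem.Set.update_nil_left]
  rw [hkeys]
  apply List.map_congr_left
  intro k _
  have hget : d.getD k [] = kept.filter (fun g => PySem.Str.slice g none (some 2) == k) := by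
    rw [hd, PySem.Dict.getD_foldl_modify_append]
    simp [hpairs, List.filter_map, List.map_map, Function.comp_def]
  rw [hget]
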